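-- pv_equiv track=rewrite | github.com/navkant/ds_algo_day_wise | day_11_intro_to_hashing_2/colour_full_number.py | solve
-- ===== SOURCE A (Python) =====
-- def solve(A: int):
--     number_sequence = []
--     hash_map = {}
--     num = A
--     while num:
--         rem = num % 10
--         number_sequence.append(rem)
--         if rem in hash_map:
--             return 0
--         else:
--             hash_map[rem] = 1
--         num = num // 10
--
--     if len(number_sequence) == 1:
--         return 1
--     elif len(number_sequence) == 2:
--         if 1 in number_sequence:
--             return 0
--
--     number_sequence.reverse()
--
--     for i in range(len(number_sequence)-1):
--         j = i + 1
--         product = number_sequence[i]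
--         while j < len(number_sequence):
--             product *= number_sequence[j]
--             if product not in hash_map:
--                 hash_map[product] = 1
--             else:
--                 return 0
--             j += 1
--
--     return 1
-- ===== SOURCE B (Python) =====
-- def solve(A: int):
--     digits = []
--     num = A
--     while num:
--         d = num % 10
--         if d in digits:
--             return 0
--         digits.append(d)
--         num //= 10
--     digits.reverse()
--     seen = set(digits)
--     ending = []  # products of contiguous subarrays (length >= 1) ending at the previous digit
--     for d in digits:
--         ending = [p * d for p in ending]
--         for v in ending:
--             if v in seen:
--                 return 0
--             seen.add(v)
--         ending.append(d)
--     return 1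
-- ===== Notes on version B (the rewrite author's own statement) =====
-- stated objective: alternative
-- what changed: B replaces A's nested i<j index loops (restarting a running product at every start index, plus the two-digit/contains-1 special case) by a single left-to-right dynamic-programming pass that maintains the list of products of all subarrays ending at the current digit (ending = [p*d for p in ending] then append d), checking each new product against one seen-set.
import Mathlib
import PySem

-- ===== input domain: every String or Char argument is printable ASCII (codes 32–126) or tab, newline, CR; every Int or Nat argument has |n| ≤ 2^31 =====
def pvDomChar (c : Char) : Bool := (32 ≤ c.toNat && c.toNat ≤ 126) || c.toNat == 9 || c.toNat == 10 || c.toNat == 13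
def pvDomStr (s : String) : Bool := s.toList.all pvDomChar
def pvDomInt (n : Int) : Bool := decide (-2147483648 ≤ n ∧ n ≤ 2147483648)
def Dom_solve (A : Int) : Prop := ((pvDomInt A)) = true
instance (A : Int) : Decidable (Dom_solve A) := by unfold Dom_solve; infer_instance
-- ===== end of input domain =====

-- B replaces A's nested start-index/end-index product loops by one left-to-right DP pass
-- maintaining the products of all subarrays ending at the current digit; objective:
-- alternative algorithm of the same cost.

-- ===== PORT A =====
-- `while num:` loop. fuel bounds the iterations: each non-returning step inserts a FRESH
-- key (a digit 0–9) into hash_map, so the loop runs at most 11 times; 64 is never reached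
-- on the domain. `none` = the early `return 0` on a repeated digit (or fuel out).
def solveExtract (fuel : Nat) (num : Int) (seq : List Int) (hm : PySem.Dict Int Int) :
    Option (List Int × PySem.Dict Int Int) :=
  match fuel with
  | 0 => none
  | fuel + 1 =>
    if num ≠ 0 then
      let rem := PySem.Int.mod num 10
      let seq := seq ++ [rem]
      if hm.contains rem then none
      else solveExtract fuel (PySem.Int.floordiv num 10) seq (hm.insert rem 1)
    else some (seq, hm)

-- inner `while j < len(...)` loop; `none` = `return 0`
def solveInner (seq : List Int) (j : Nat) (product : Int) (hm : PySem.Dict Int Int) :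
    Option (PySem.Dict Int Int) :=
  if j < seq.length then
    let product := product * PySem.List.pyGetD seq (j : Int) 0
    if ¬ hm.contains product then solveInner seq (j + 1) product (hm.insert product 1)
    else none
  else some hm
termination_by seq.length - j

-- `for i in range(len(...)-1)` loop
def solveOuter (seq : List Int) (i : Nat) (hm : PySem.Dict Int Int) :
    Option (PySem.Dict Int Int) :=
  if i + 1 < seq.length then
    match solveInner seq (i + 1) (PySem.List.pyGetD seq (i : Int) 0) hm with
    | none => none
    | some hm => solveOuter seq (i + 1) hm
  else some hm
termination_by seq.length - i

def solve (A : Int) : Int :=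
  match solveExtract 64 A [] PySem.Dict.empty with
  | none => 0
  | some (seq, hm) =>
    if seq.length = 1 then 1
    else if seq.length = 2 ∧ 1 ∈ seq then 0
    else
      let seq := seq.reverse
      match solveOuter seq 0 hm with
      | none => 0
      | some _ => 1

-- ===== PORT B =====
-- same `while num:` digit extraction (fuel as in port A); `none` = the `return 0`
def solveAltDigits (fuel : Nat) (num : Int) (digits : List Int) : Option (List Int) :=
  match fuel with
  | 0 => none
  | fuel + 1 =>
    if num ≠ 0 then
      let d := PySem.Int.mod num 10
      if d ∈ digits then none
      else solveAltDigits fuel (PySem.Int.floordiv num 10) (digits ++ [d])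
    else some digits

-- inner `for v in ending:` membership-check loop; `none` = `return 0`
def solveAltCheck (vs : List Int) (seen : PySem.Set Int) : Option (PySem.Set Int) :=
  match vs with
  | [] => some seen
  | v :: vs =>
    if PySem.Set.contains seen v then none
    else solveAltCheck vs (PySem.Set.add seen v)

-- `for d in digits:` DP loop: `ending` holds the products of all contiguous subarrays
-- ending at the previous digit
def solveAltScan (ending : List Int) (ds : List Int) (seen : PySem.Set Int) :
    Option (PySem.Set Int) :=
  match ds with
  | [] => some seen
  | d :: r =>
    let news := ending.map (· * d)
    match solveAltCheck news seen with
    | none => none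
    | some seen => solveAltScan (news ++ [d]) r seen

def solve_alt (A : Int) : Int :=
  match solveAltDigits 64 A [] with
  | none => 0
  | some ds =>
    let digits := ds.reverse
    match solveAltScan [] digits (PySem.Set.ofList digits) with
    | none => 0
    | some _ => 1

-- ===== PRECONDITION & SPEC =====
def Spec_solve (A : Int) (out : Int) : Prop := out = solve_alt A
instance (A : Int) (out : Int) : Decidable (Spec_solve A out) := by unfold Spec_solve; infer_instance

-- ===== CLAIM (what is proved, stated in full; the proofs are below) =====
def Claim_equal_solve : Prop := ∀ (A : Int), Dom_solve A → Spec_solve A (solve A)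

-- ===== LEMMAS AND PROOFS =====

-- Proof-side generator mirroring A's loops: collect the values A checks, in A's order
def genInner (digits : List Int) (j : Nat) (p : Int) (values : List Int) : List Int :=
  if j < digits.length then
    let p := p * PySem.List.pyGetD digits (j : Int) 0
    genInner digits (j + 1) p (values ++ [p])
  else values
termination_by digits.length - j

def genOuter (digits : List Int) (i : Nat) (values : List Int) : List Int :=
  if i + 1 < digits.length then
    genOuter digits (i + 1)
      (genInner digits (i + 1) (PySem.List.pyGetD digits (i : Int) 0) values)
  else values
termination_by digits.length - i

-- Canonical product lists: rowP x r = running products of x over r (A's inner row);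
-- prodsA = A's order (by start index); goB = B's order (by end index)
def rowP (x : Int) : List Int → List Int
  | [] => []
  | y :: r => (x * y) :: rowP (x * y) r

def prodsA : List Int → List Int
  | [] => []
  | x :: r => rowP x r ++ prodsA r

def goB (ending : List Int) : List Int → List Int
  | [] => []
  | d :: r => ending.map (· * d) ++ goB (ending.map (· * d) ++ [d]) r

theorem genInner_append_aux (digits : List Int) : ∀ (n j : Nat), digits.length ≤ j + n →
    ∀ (p : Int) (V : List Int),
    genInner digits j p V = V ++ genInner digits j p [] := by
  intro n
  induction n with
  | zero =>
    intro j hj p V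
    conv_lhs => rw [genInner.eq_def]
    conv_rhs => rw [genInner.eq_def]
    rw [if_neg (by omega), if_neg (by omega)]
    simp
  | succ n ih =>
    intro j hj p V
    by_cases h : j < digits.length
    · conv_lhs => rw [genInner.eq_def]
      conv_rhs => rw [genInner.eq_def]
      rw [if_pos h, if_pos h]
      rw [ih (j + 1) (by omega), ih (j + 1) (by omega) _ ([] ++ _)]
      simp
    · conv_lhs => rw [genInner.eq_def]
      conv_rhs => rw [genInner.eq_def]
      rw [if_neg h, if_neg h]
      simp

theorem genInner_append (digits : List Int) (j : Nat) (p : Int) (V : List Int) :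
    genInner digits j p V = V ++ genInner digits j p [] :=
  genInner_append_aux digits digits.length j (by omega) p V

theorem genOuter_append_aux (digits : List Int) : ∀ (n i : Nat), digits.length ≤ i + n →
    ∀ (V : List Int),
    genOuter digits i V = V ++ genOuter digits i [] := by
  intro n
  induction n with
  | zero =>
    intro i hi V
    conv_lhs => rw [genOuter.eq_def]
    conv_rhs => rw [genOuter.eq_def]
    rw [if_neg (by omega), if_neg (by omega)]
    simp
  | succ n ih =>
    intro i hi V
    by_cases h : i + 1 < digits.length
    · conv_lhs => rw [genOuter.eq_def]
      conv_rhs => rw [genOuter.eq_def]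
      rw [if_pos h, if_pos h]
      rw [ih (i + 1) (by omega), ih (i + 1) (by omega) (genInner digits (i + 1) _ [])]
      rw [genInner_append digits (i + 1) _ V]
      simp
    · conv_lhs => rw [genOuter.eq_def]
      conv_rhs => rw [genOuter.eq_def]
      rw [if_neg h, if_neg h]
      simp

theorem genOuter_append (digits : List Int) (i : Nat) (V : List Int) :
    genOuter digits i V = V ++ genOuter digits i [] :=
  genOuter_append_aux digits digits.length i (by omega) V

-- A's incremental hash check agrees with the build-then-dedup reading (inner loop)
theorem inner_rel (seq : List Int) : ∀ (n j : Nat), seq.length ≤ j + n →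
    ∀ (p : Int) (hm : PySem.Dict Int Int) (L : List Int),
    (∀ x, hm.contains x = true ↔ x ∈ L) → L.Nodup →
    (solveInner seq j p hm = none ∧ ¬ (genInner seq j p L).Nodup)
    ∨ (∃ hm', solveInner seq j p hm = some hm' ∧
        (∀ x, hm'.contains x = true ↔ x ∈ genInner seq j p L) ∧
        (genInner seq j p L).Nodup) := by
  intro n
  induction n with
  | zero =>
    intro j hj p hm L hinv hnd
    have hA : solveInner seq j p hm = some hm := by
      rw [solveInner.eq_def]; rw [if_neg (by omega)]
    have hB : genInner seq j p L = L := by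
      rw [genInner.eq_def]; rw [if_neg (by omega)]
    exact Or.inr ⟨hm, hA, by rw [hB]; exact hinv, by rw [hB]; exact hnd⟩
  | succ n ih =>
    intro j hj p hm L hinv hnd
    by_cases h : j < seq.length
    · have hA : solveInner seq j p hm =
          (if ¬ hm.contains (p * PySem.List.pyGetD seq (j : Int) 0) then
            solveInner seq (j + 1) (p * PySem.List.pyGetD seq (j : Int) 0)
              (hm.insert (p * PySem.List.pyGetD seq (j : Int) 0) 1)
          else none) := by
        rw [solveInner.eq_def]; rw [if_pos h]
      have hB : genInner seq j p L =
          genInner seq (j + 1) (p * PySem.List.pyGetD seq (j : Int) 0)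
            (L ++ [p * PySem.List.pyGetD seq (j : Int) 0]) := by
        rw [genInner.eq_def]; rw [if_pos h]
      set P := p * PySem.List.pyGetD seq (j : Int) 0 with hP
      by_cases hc : hm.contains P = true
      · left
        have hPL : P ∈ L := (hinv P).mp hc
        refine ⟨by rw [hA, if_neg (by simp [hc])], ?_⟩
        rw [hB, genInner_append]
        intro hnd2
        have h1 : (L ++ [P]).Nodup := hnd2.of_append_left
        rw [List.nodup_append] at h1
        exact h1.2.2 P hPL P (by simp) rfl
      · have hinv' : ∀ x, (hm.insert P 1).contains x = true ↔ x ∈ L ++ [P] := by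
          intro x
          rw [PySem.Dict.contains_insert]
          simp only [List.mem_append, List.mem_singleton, Bool.or_eq_true, beq_iff_eq]
          rw [hinv x]
          tauto
        have hnd' : (L ++ [P]).Nodup := by
          rw [List.nodup_append]
          refine ⟨hnd, List.nodup_singleton P, ?_⟩
          intro a ha b hb hab
          simp only [List.mem_singleton] at hb
          subst hb
          subst hab
          exact hc ((hinv _).mpr ha)
        rcases ih (j + 1) (by omega) P (hm.insert P 1) (L ++ [P]) hinv' hnd' with
          ⟨h1, h2⟩ | ⟨hm', h1, h2, h3⟩
        · exact Or.inl ⟨by rw [hA, if_pos (by simp [hc])]; exact h1, by rw [hB]; exact h2⟩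
        · exact Or.inr ⟨hm', by rw [hA, if_pos (by simp [hc])]; exact h1,
            by rw [hB]; exact h2, by rw [hB]; exact h3⟩
    · have hA : solveInner seq j p hm = some hm := by
        rw [solveInner.eq_def]; rw [if_neg h]
      have hB : genInner seq j p L = L := by
        rw [genInner.eq_def]; rw [if_neg h]
      exact Or.inr ⟨hm, hA, by rw [hB]; exact hinv, by rw [hB]; exact hnd⟩

-- ... and the outer loop
theorem outer_rel (seq : List Int) : ∀ (n i : Nat), seq.length ≤ i + n →
    ∀ (hm : PySem.Dict Int Int) (L : List Int),
    (∀ x, hm.contains x = true ↔ x ∈ L) → L.Nodup →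
    (solveOuter seq i hm = none ∧ ¬ (genOuter seq i L).Nodup)
    ∨ (∃ hm', solveOuter seq i hm = some hm' ∧ (genOuter seq i L).Nodup) := by
  intro n
  induction n with
  | zero =>
    intro i hi hm L hinv hnd
    have hA : solveOuter seq i hm = some hm := by
      rw [solveOuter.eq_def]; rw [if_neg (by omega)]
    have hB : genOuter seq i L = L := by
      rw [genOuter.eq_def]; rw [if_neg (by omega)]
    exact Or.inr ⟨hm, hA, by rw [hB]; exact hnd⟩
  | succ n ih =>
    intro i hi hm L hinv hnd
    by_cases h : i + 1 < seq.length
    · have hA : solveOuter seq i hm =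
          (match solveInner seq (i + 1) (PySem.List.pyGetD seq (i : Int) 0) hm with
           | none => none
           | some hm => solveOuter seq (i + 1) hm) := by
        rw [solveOuter.eq_def]; rw [if_pos h]
      have hB : genOuter seq i L =
          genOuter seq (i + 1)
            (genInner seq (i + 1) (PySem.List.pyGetD seq (i : Int) 0) L) := by
        rw [genOuter.eq_def]; rw [if_pos h]
      rcases inner_rel seq seq.length (i + 1) (by omega)
          (PySem.List.pyGetD seq (i : Int) 0) hm L hinv hnd with
        ⟨h1, h2⟩ | ⟨hm', h1, h2, h3⟩
      · left
        refine ⟨by rw [hA, h1], ?_⟩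
        rw [hB, genOuter_append]
        intro hnd2
        exact h2 hnd2.of_append_left
      · rcases ih (i + 1) (by omega) hm' _ h2 h3 with ⟨g1, g2⟩ | ⟨hm2, g1, g2⟩
        · exact Or.inl ⟨by rw [hA, h1]; exact g1, by rw [hB]; exact g2⟩
        · exact Or.inr ⟨hm2, by rw [hA, h1]; exact g1, by rw [hB]; exact g2⟩
    · have hA : solveOuter seq i hm = some hm := by
        rw [solveOuter.eq_def]; rw [if_neg h]
      have hB : genOuter seq i L = L := by
        rw [genOuter.eq_def]; rw [if_neg h]
      exact Or.inr ⟨hm, hA, by rw [hB]; exact hnd⟩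

-- the two digit-extraction loops agree step for step
theorem extract_rel : ∀ (fuel : Nat) (num : Int) (seq : List Int) (hm : PySem.Dict Int Int),
    (∀ x, hm.contains x = true ↔ x ∈ seq) → seq.Nodup →
    (solveExtract fuel num seq hm = none ∧ solveAltDigits fuel num seq = none)
    ∨ (∃ ds hm', solveExtract fuel num seq hm = some (ds, hm') ∧
        solveAltDigits fuel num seq = some ds ∧
        (∀ x, hm'.contains x = true ↔ x ∈ ds) ∧ ds.Nodup) := by
  intro fuel
  induction fuel with
  | zero =>
    intro num seq hm hinv hnd
    exact Or.inl ⟨rfl, rfl⟩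
  | succ fuel ih =>
    intro num seq hm hinv hnd
    by_cases hz : num ≠ 0
    · set rem := PySem.Int.mod num 10 with hrem
      have hA : solveExtract (fuel + 1) num seq hm =
          (if hm.contains rem then none
           else solveExtract fuel (PySem.Int.floordiv num 10) (seq ++ [rem]) (hm.insert rem 1)) := by
        rw [solveExtract]; rw [if_pos hz]
      have hB : solveAltDigits (fuel + 1) num seq =
          (if rem ∈ seq then none
           else solveAltDigits fuel (PySem.Int.floordiv num 10) (seq ++ [rem])) := by
        rw [solveAltDigits]; rw [if_pos hz]
      by_cases hc : rem ∈ seq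
      · left
        constructor
        · rw [hA, if_pos ((hinv rem).mpr hc)]
        · rw [hB, if_pos hc]
      · have hcf : ¬ hm.contains rem = true := fun hx => hc ((hinv rem).mp hx)
        have hinv' : ∀ x, (hm.insert rem 1).contains x = true ↔ x ∈ seq ++ [rem] := by
          intro x
          rw [PySem.Dict.contains_insert]
          simp only [List.mem_append, List.mem_singleton, Bool.or_eq_true, beq_iff_eq]
          rw [hinv x]
          tauto
        have hnd' : (seq ++ [rem]).Nodup := by
          rw [List.nodup_append]
          refine ⟨hnd, List.nodup_singleton rem, ?_⟩
          intro a ha b hb hab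
          simp only [List.mem_singleton] at hb
          subst hb
          subst hab
          exact hc ha
        rcases ih (PySem.Int.floordiv num 10) (seq ++ [rem]) (hm.insert rem 1) hinv' hnd' with
          ⟨h1, h2⟩ | ⟨ds, hm', h1, h2, h3, h4⟩
        · exact Or.inl ⟨by rw [hA, if_neg (by simpa using hcf)]; exact h1,
            by rw [hB, if_neg hc]; exact h2⟩
        · exact Or.inr ⟨ds, hm', by rw [hA, if_neg (by simpa using hcf)]; exact h1,
            by rw [hB, if_neg hc]; exact h2, h3, h4⟩
    · have hA : solveExtract (fuel + 1) num seq hm = some (seq, hm) := by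
        rw [solveExtract]; rw [if_neg hz]
      have hB : solveAltDigits (fuel + 1) num seq = some seq := by
        rw [solveAltDigits]; rw [if_neg hz]
      exact Or.inr ⟨seq, hm, hA, hB, hinv, hnd⟩

-- A's indexed generator computes the canonical by-start-index product lists
theorem genInner_eq_rowP (digits : List Int) : ∀ (n j : Nat), digits.length ≤ j + n →
    ∀ (p : Int), genInner digits j p [] = rowP p (digits.drop j) := by
  intro n
  induction n with
  | zero =>
    intro j hj p
    rw [genInner.eq_def, if_neg (by omega), List.drop_of_length_le (by omega)]
    rfl
  | succ n ih =>
    intro j hj p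
    by_cases h : j < digits.length
    · rw [genInner.eq_def, if_pos h]
      rw [genInner_append, ih (j + 1) (by omega)]
      have hd : digits.drop j = digits[j] :: digits.drop (j + 1) :=
        List.drop_eq_getElem_cons h
      have hg : PySem.List.pyGetD digits (j : Int) 0 = digits[j] := by
        rw [PySem.List.pyGetD_natCast]; exact List.getD_eq_getElem digits 0 h
      rw [hd, rowP, hg]
      simp
    · rw [genInner.eq_def, if_neg h, List.drop_of_length_le (by omega)]
      rfl

theorem genOuter_eq_prodsA (digits : List Int) : ∀ (n i : Nat), digits.length ≤ i + n →
    genOuter digits i [] = prodsA (digits.drop i) := by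
  intro n
  induction n with
  | zero =>
    intro i hi
    rw [genOuter.eq_def, if_neg (by omega), List.drop_of_length_le (by omega)]
    rfl
  | succ n ih =>
    intro i hi
    by_cases h : i + 1 < digits.length
    · rw [genOuter.eq_def, if_pos h]
      rw [genOuter_append, ih (i + 1) (by omega)]
      rw [genInner_eq_rowP digits digits.length (i + 1) (by omega)]
      have hd : digits.drop i = digits[i] :: digits.drop (i + 1) :=
        List.drop_eq_getElem_cons (by omega)
      have hg : PySem.List.pyGetD digits (i : Int) 0 = digits[i] := by
        rw [PySem.List.pyGetD_natCast]; exact List.getD_eq_getElem digits 0 (by omega)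
      rw [hd, prodsA, hg]
    · rw [genOuter.eq_def, if_neg h]
      have hlen : (digits.drop i).length ≤ 1 := by
        rw [List.length_drop]; omega
      rcases hx : digits.drop i with _ | ⟨x, t⟩
      · rfl
      · rw [hx] at hlen
        have ht : t = [] := by
          simp only [List.length_cons] at hlen
          exact List.eq_nil_of_length_eq_zero (by omega)
        subst ht
        rfl

-- multiset characterisation of B's DP generator
theorem goB_multiset : ∀ (ds ending : List Int),
    ((goB ending ds : List Int) : Multiset Int)
      = (↑(prodsA ds) : Multiset Int) + ↑(ending.flatMap (fun e => rowP e ds)) := by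
  intro ds
  induction ds with
  | nil =>
    intro ending
    have h : ending.flatMap (fun e => rowP e []) = [] := by
      simp [rowP]
    simp [goB, prodsA, h]
  | cons d r ih =>
    intro ending
    have hflat : ∀ (l : List Int),
        ((l.flatMap (fun e => (e * d) :: rowP (e * d) r) : List Int) : Multiset Int)
          = (↑(l.map (· * d)) : Multiset Int) + ↑(l.flatMap (fun e => rowP (e * d) r)) := by
      intro l
      induction l with
      | nil => simp
      | cons e es ihe =>
        simp only [List.flatMap_cons, List.map_cons, ← Multiset.coe_add, ← Multiset.cons_coe]
        rw [ihe]
        simp only [← Multiset.singleton_add]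
        abel
    simp only [goB, prodsA, rowP]
    simp only [← Multiset.coe_add]
    rw [ih (ending.map (· * d) ++ [d])]
    rw [hflat ending]
    simp only [List.flatMap_append, List.flatMap_cons, List.flatMap_nil, List.append_nil,
      List.flatMap_map, ← Multiset.coe_add]
    abel

theorem goB_perm_prodsA (ds : List Int) : List.Perm (goB [] ds) (prodsA ds) := by
  rw [← Multiset.coe_eq_coe, goB_multiset ds []]
  simp

-- B's incremental set check agrees with the build-then-dedup reading (check loop)
theorem check_rel : ∀ (vs : List Int) (seen : PySem.Set Int) (L : List Int),
    (∀ x, PySem.Set.contains seen x = true ↔ x ∈ L) → L.Nodup →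
    (solveAltCheck vs seen = none ∧ ¬ (L ++ vs).Nodup)
    ∨ (∃ s', solveAltCheck vs seen = some s' ∧
        (∀ x, PySem.Set.contains s' x = true ↔ x ∈ L ++ vs) ∧ (L ++ vs).Nodup) := by
  intro vs
  induction vs with
  | nil =>
    intro seen L hinv hnd
    exact Or.inr ⟨seen, rfl, by simpa using hinv, by simpa using hnd⟩
  | cons v vs ih =>
    intro seen L hinv hnd
    by_cases hc : PySem.Set.contains seen v = true
    · left
      refine ⟨by rw [solveAltCheck, if_pos hc], ?_⟩
      have hvL : v ∈ L := (hinv v).mp hc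
      intro hnd2
      rw [List.nodup_append] at hnd2
      exact hnd2.2.2 v hvL v (by simp) rfl
    · have hvL : v ∉ L := fun hx => hc ((hinv v).mpr hx)
      have hinv' : ∀ x, PySem.Set.contains (PySem.Set.add seen v) x = true ↔ x ∈ L ++ [v] := by
        intro x
        rw [PySem.Set.contains_iff, PySem.Set.mem_add]
        simp only [List.mem_append, List.mem_singleton]
        rw [← PySem.Set.contains_iff, hinv x]
      have hnd' : (L ++ [v]).Nodup := by
        rw [List.nodup_append]
        refine ⟨hnd, List.nodup_singleton v, ?_⟩
        intro a ha b hb hab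
        simp only [List.mem_singleton] at hb
        subst hb; subst hab
        exact hvL ha
      rcases ih (PySem.Set.add seen v) (L ++ [v]) hinv' hnd' with
        ⟨h1, h2⟩ | ⟨s', h1, h2, h3⟩
      · refine Or.inl ⟨by rw [solveAltCheck, if_neg hc]; exact h1, ?_⟩
        simpa using h2
      · refine Or.inr ⟨s', by rw [solveAltCheck, if_neg hc]; exact h1, ?_, ?_⟩
        · intro x; rw [h2 x]; simp
        · simpa using h3

-- ... and the DP loop
theorem scan_rel : ∀ (ds ending : List Int) (seen : PySem.Set Int) (L : List Int),
    (∀ x, PySem.Set.contains seen x = true ↔ x ∈ L) → L.Nodup →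
    (solveAltScan ending ds seen = none ∧ ¬ (L ++ goB ending ds).Nodup)
    ∨ (∃ s', solveAltScan ending ds seen = some s' ∧ (L ++ goB ending ds).Nodup) := by
  intro ds
  induction ds with
  | nil =>
    intro ending seen L hinv hnd
    exact Or.inr ⟨seen, rfl, by simpa [goB] using hnd⟩
  | cons d r ih =>
    intro ending seen L hinv hnd
    rcases check_rel (ending.map (· * d)) seen L hinv hnd with
      ⟨h1, h2⟩ | ⟨s', h1, h2, h3⟩
    · left
      refine ⟨by rw [solveAltScan, h1], ?_⟩
      simp only [goB, ← List.append_assoc]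
      intro hnd2
      exact h2 hnd2.of_append_left
    · rcases ih (ending.map (· * d) ++ [d]) s' (L ++ ending.map (· * d)) h2 h3 with
        ⟨g1, g2⟩ | ⟨s2, g1, g2⟩
      · refine Or.inl ⟨by rw [solveAltScan, h1]; exact g1, ?_⟩
        simpa [goB, List.append_assoc] using g2
      · refine Or.inr ⟨s2, by rw [solveAltScan, h1]; exact g1, ?_⟩
        simpa [goB, List.append_assoc] using g2

-- B's value list for a one-digit number is just that digit; for two digits it carries
-- their product as well
theorem goB_one (d : Int) : goB [] [d] = [] := by
  simp [goB]

theorem goB_two (y x : Int) : goB [] [y, x] = [y * x] := by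
  simp [goB]

-- ===== VERDICT (by name: the statement is the Claim_ definition above) =====
theorem solve_spec : Claim_equal_solve := by
  unfold Claim_equal_solve
  intro A _
  unfold Spec_solve solve solve_alt
  rcases extract_rel 64 A [] PySem.Dict.empty
      (by intro x; simp [PySem.Dict.contains_empty]) List.nodup_nil with
    ⟨hA, hB⟩ | ⟨ds, hm', hA, hB, hinv, hnd⟩
  · rw [hA, hB]
  · rw [hA, hB]
    simp only
    have hndr : ds.reverse.Nodup := by simpa using hnd
    have hinvS : ∀ x, PySem.Set.contains (PySem.Set.ofList ds.reverse) x = true ↔ x ∈ ds.reverse := by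
      intro x
      rw [PySem.Set.contains_iff, PySem.Set.mem_ofList]
    by_cases h1 : ds.length = 1
    · obtain ⟨d, rfl⟩ := List.length_eq_one_iff.mp h1
      rw [if_pos h1]
      rcases scan_rel [d].reverse [] (PySem.Set.ofList [d].reverse) [d].reverse hinvS hndr with
        ⟨g1, g2⟩ | ⟨s2, g1, g2⟩
      · exfalso
        apply g2
        simp [goB_one]
      · rw [g1]
    · by_cases h2 : ds.length = 2 ∧ 1 ∈ ds
      · obtain ⟨x, y, rfl⟩ := List.length_eq_two.mp h2.1
        have hxy : x ≠ y := by simp at hnd; exact hnd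
        rw [if_neg h1, if_pos h2]
        have hrev : ([x, y] : List Int).reverse = [y, x] := by simp
        have hnn : ¬ (([y, x] ++ goB [] [y, x]).Nodup) := by
          rw [goB_two]
          have hmem := h2.2
          simp only [List.mem_cons, List.not_mem_nil, or_false] at hmem
          rcases hmem with h | h
          · intro hn; rw [← h] at hn; simp at hn
          · intro hn; rw [← h] at hn; simp at hn
        rw [hrev] at hinvS hndr ⊢
        rcases scan_rel [y, x] [] (PySem.Set.ofList [y, x]) [y, x] hinvS hndr with
          ⟨g1, g2⟩ | ⟨s2, g1, g2⟩
        · rw [g1]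
        · exact absurd g2 hnn
      · rw [if_neg h1, if_neg h2]
        have hinvR : ∀ z, hm'.contains z = true ↔ z ∈ ds.reverse := by
          intro z; rw [hinv z]; simp
        -- the A-side value list equals digits ++ prodsA, a permutation of B's digits ++ goB
        have hgen : genOuter ds.reverse 0 ds.reverse = ds.reverse ++ prodsA ds.reverse := by
          rw [genOuter_append, genOuter_eq_prodsA ds.reverse ds.reverse.length 0 (by omega)]
          simp
        have hperm : List.Perm (genOuter ds.reverse 0 ds.reverse) (ds.reverse ++ goB [] ds.reverse) := by
          rw [hgen]
          exact ((goB_perm_prodsA ds.reverse).symm).append_left ds.reverse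
        rcases outer_rel ds.reverse ds.reverse.length 0 (by omega) hm' ds.reverse hinvR hndr with
          ⟨ho, hn⟩ | ⟨hm2, ho, hn⟩ <;>
        rcases scan_rel ds.reverse [] (PySem.Set.ofList ds.reverse) ds.reverse hinvS hndr with
          ⟨g1, g2⟩ | ⟨s2, g1, g2⟩
        · rw [ho, g1]
        · exact absurd (hperm.nodup_iff.mpr g2) hn
        · exact absurd (hperm.nodup_iff.mp hn) g2
        · rw [ho, g1]
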